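-- pv_equiv track=rewrite | github.com/vunf1/PythonBotChat | Chatbot-coach-server/sentenceParsing.py | matchCategory
-- ===== SOURCE A (Python) =====
-- conditioningList = ['treadmill','bike','cross trainer','rowing machine','skipping','eliptical','step machine']
--
-- strengthList = ['core','back','shoulder','tricep','bicep','glute','calf','quad','chest','lat','trap','leg','forearm']
--
-- greetingList = ['hi','hello','sup','hey','chao','bonjour','whad up']
--
-- monthList = ['january','feburary','march','april','may','june','july','august','september','october','november','december']
--
-- dateList = []
--
-- def matchCategory(word):
--     """User string is input, string searched for specific words, outputs categories words associated with"""
--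
--     if word[-1] == "s":
--         for x in conditioningList:      #removes plural 's' from input
--             if word[0:-1]== x:
--                 return ("Cardio",word[0:-1])
--
--         for x in strengthList:
--             if word[0:-1]== x:
--                 return ("Strength",word[0:-1])
--
--         if word[0:-1] == "calorie":
--             return ("Calorie",word[0:-1])
--
--         for x in greetingList:
--             if word[0:-1] == x:
--                 return ("Greeting",word[0:-1])
--
--     else:
--         for x in conditioningList:      #no plural then it is returned to either strength, conditioning
--             if word == x:               # greeting, calorie, date or month.
--                 return ("Cardio",word)
--
--         for x in strengthList:
--             if word == x:
--                 return ("Strength",word)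
--
--         if word == "calorie":
--             return ("Calorie",word)
--
--         for x in greetingList:
--             if word == x:
--                 return ("Greeting",word)
--
--         for x in dateList:
--             if word == x:
--                 return ("Date",word)
--
--         for x in monthList:
--             if word == x:
--                 return ("Month",word)
--     return ("N/a",word)                   #Words that do not fit into any category are put into N/A (ignored)
-- ===== SOURCE B (Python) =====
-- conditioningList = ['treadmill','bike','cross trainer','rowing machine','skipping','eliptical','step machine']
--
-- strengthList = ['core','back','shoulder','tricep','bicep','glute','calf','quad','chest','lat','trap','leg','forearm']
--
-- greetingList = ['hi','hello','sup','hey','chao','bonjour','whad up']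
--
-- monthList = ['january','feburary','march','april','may','june','july','august','september','october','november','december']
--
-- dateList = []
--
-- # One flat keyword table, sorted once by keyword so each call is a bisection
-- # (binary search) instead of six sequential list scans.
-- _PAIRS = ([(w, 'Cardio') for w in conditioningList]
--           + [(w, 'Strength') for w in strengthList]
--           + [('calorie', 'Calorie')]
--           + [(w, 'Greeting') for w in greetingList]
--           + [(w, 'Date') for w in dateList]
--           + [(w, 'Month') for w in monthList])
-- _TABLE = sorted(_PAIRS, key=lambda p: p[0])
--
-- def _bisect(w):
--     """Binary search for w in the sorted keyword table; its category or None."""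
--     lo, hi = 0, len(_TABLE)
--     while lo < hi:
--         mid = (lo + hi) // 2
--         k, c = _TABLE[mid]
--         if k < w:
--             lo = mid + 1
--         elif w < k:
--             hi = mid
--         else:
--             return c
--     return None
--
-- def matchCategory(word):
--     """User string is input, string searched for specific words, outputs categories words associated with"""
--     if word[-1] == "s":
--         # plural branch: look up the stripped word; the original code never
--         # checks dates/months here, so those categories are rejected.
--         base = word[:-1]
--         c = _bisect(base)
--         if c is None or c == 'Date' or c == 'Month':
--             return ("N/a", word)
--         return (c, base)
--     else:
--         c = _bisect(word)
--         if c is None: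
--             return ("N/a", word)
--         return (c, word)
-- ===== Notes on version B (the rewrite author's own statement) =====
-- stated objective: alternative
-- what changed: Replaces A's six sequential keyword-list scans (duplicated across the plural and non-plural branches) with one flat keyword table sorted once at load and a hand-written binary search per call; the plural branch's missing month/date checks become a category filter on the lookup result.
-- outside the precondition, e.g. on matchCategory(''): A raises IndexError, B raises IndexError
import Mathlib
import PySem

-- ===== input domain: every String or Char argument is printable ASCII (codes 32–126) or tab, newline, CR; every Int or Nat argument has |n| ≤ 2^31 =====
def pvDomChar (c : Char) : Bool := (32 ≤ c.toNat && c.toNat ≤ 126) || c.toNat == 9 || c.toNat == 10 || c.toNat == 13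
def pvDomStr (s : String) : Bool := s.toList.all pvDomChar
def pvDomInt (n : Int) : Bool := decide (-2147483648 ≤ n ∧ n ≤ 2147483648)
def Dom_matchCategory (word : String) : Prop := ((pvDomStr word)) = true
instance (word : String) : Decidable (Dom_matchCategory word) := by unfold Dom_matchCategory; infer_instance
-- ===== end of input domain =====

-- B replaces A's six sequential keyword-list scans with one keyword table sorted
-- once at load and a hand-written binary search per call. Objective: alternative.

-- ===== PORT A =====
def condListA : List String := ["treadmill","bike","cross trainer","rowing machine","skipping","eliptical","step machine"]
def strengthListA : List String := ["core","back","shoulder","tricep","bicep","glute","calf","quad","chest","lat","trap","leg","forearm"]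
def greetingListA : List String := ["hi","hello","sup","hey","chao","bonjour","whad up"]
def monthListA : List String := ["january","feburary","march","april","may","june","july","august","september","october","november","december"]
def dateListA : List String := []

-- 'for x in lst: if w == x: return …' as a scan returning whether some element equals w
def scanEq (l : List String) (w : String) : Bool :=
  match l with
  | [] => false
  | x :: xs => if w == x then true else scanEq xs w

def matchCategory (word : String) : String × String :=
  if PySem.Str.pyGet? word (-1) == some 's' then
    -- word[0:-1]
    if scanEq condListA (PySem.Str.slice word (some 0) (some (-1))) then
      ("Cardio", PySem.Str.slice word (some 0) (some (-1)))
    else if scanEq strengthListA (PySem.Str.slice word (some 0) (some (-1))) then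
      ("Strength", PySem.Str.slice word (some 0) (some (-1)))
    else if PySem.Str.slice word (some 0) (some (-1)) == "calorie" then
      ("Calorie", PySem.Str.slice word (some 0) (some (-1)))
    else if scanEq greetingListA (PySem.Str.slice word (some 0) (some (-1))) then
      ("Greeting", PySem.Str.slice word (some 0) (some (-1)))
    else ("N/a", word)
  else
    if scanEq condListA word then ("Cardio", word)
    else if scanEq strengthListA word then ("Strength", word)
    else if word == "calorie" then ("Calorie", word)
    else if scanEq greetingListA word then ("Greeting", word)
    else if scanEq dateListA word then ("Date", word)
    else if scanEq monthListA word then ("Month", word)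
    else ("N/a", word)

-- ===== PORT B =====
-- [(w, c) for w in l]
def tagAll (l : List String) (c : String) : List (String × String) := l.map (fun w => (w, c))

-- _PAIRS of Source B
def pairsB : List (String × String) :=
  tagAll condListA "Cardio" ++ tagAll strengthListA "Strength" ++ [("calorie", "Calorie")]
    ++ tagAll greetingListA "Greeting" ++ tagAll dateListA "Date" ++ tagAll monthListA "Month"

-- _TABLE = sorted(_PAIRS, key=lambda p: p[0])
-- (key = the keyword's code points: Python's '<' on str is '<' on .toList, see PYSEM.md)
def tableB : List (String × String) := PySem.List.sorted pairsB (fun p => p.1.toList) false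

-- _bisect's while-loop as recursion on hi - lo (the '| none' arm is the
-- unreachable out-of-range case of _TABLE[mid], kept only for totality)
def bisectB (w : String) (lo hi : Nat) : Option String :=
  if _h : lo < hi then
    let mid := (lo + hi) / 2
    match tableB[mid]? with
    | some (k, c) =>
        if k.toList < w.toList then bisectB w (mid + 1) hi
        else if w.toList < k.toList then bisectB w lo mid
        else some c
    | none => none
  else none
termination_by hi - lo
decreasing_by all_goals omega

def matchCategory_alt (word : String) : String × String :=
  if PySem.Str.pyGet? word (-1) == some 's' then
    let base := PySem.Str.slice word (some 0) (some (-1))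
    match bisectB base 0 tableB.length with
    | none => ("N/a", word)
    | some c => if c == "Date" || c == "Month" then ("N/a", word) else (c, base)
  else
    match bisectB word 0 tableB.length with
    | none => ("N/a", word)
    | some c => (c, word)

-- ===== PRECONDITION & SPEC =====
-- Pre_ excludes only the empty string, on which A (and B) raise IndexError at word[-1].
def Pre_matchCategory (word : String) : Prop := word ≠ ""
instance (word : String) : Decidable (Pre_matchCategory word) := by unfold Pre_matchCategory; infer_instance
def pvWitness_matchCategory : String := "bikes"

def Spec_matchCategory (word : String) (out : String × String) : Prop := out = matchCategory_alt word
instance (word : String) (out : String × String) : Decidable (Spec_matchCategory word out) := by unfold Spec_matchCategory; infer_instance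

-- ===== CLAIM (what is proved, stated in full; the proofs are below) =====
def Claim_equal_matchCategory : Prop := ∀ (word : String), Dom_matchCategory word → Pre_matchCategory word → Spec_matchCategory word (matchCategory word)

-- ===== LEMMAS AND PROOFS =====

-- first-match association lookup: the reference the binary search is proved against
def lookupLin (l : List (String × String)) (w : String) : Option String :=
  match l with
  | [] => none
  | (k, v) :: r => if w == k then some v else lookupLin r w

-- the sorted table, spelled out
def tableL : List (String × String) :=
  [("april", "Month"), ("august", "Month"), ("back", "Strength"), ("bicep", "Strength"),
   ("bike", "Cardio"), ("bonjour", "Greeting"), ("calf", "Strength"), ("calorie", "Calorie"),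
   ("chao", "Greeting"), ("chest", "Strength"), ("core", "Strength"), ("cross trainer", "Cardio"),
   ("december", "Month"), ("eliptical", "Cardio"), ("feburary", "Month"), ("forearm", "Strength"),
   ("glute", "Strength"), ("hello", "Greeting"), ("hey", "Greeting"), ("hi", "Greeting"),
   ("january", "Month"), ("july", "Month"), ("june", "Month"), ("lat", "Strength"),
   ("leg", "Strength"), ("march", "Month"), ("may", "Month"), ("november", "Month"),
   ("october", "Month"), ("quad", "Strength"), ("rowing machine", "Cardio"), ("september", "Month"),
   ("shoulder", "Strength"), ("skipping", "Cardio"), ("step machine", "Cardio"), ("sup", "Greeting"),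
   ("trap", "Strength"), ("treadmill", "Cardio"), ("tricep", "Strength"), ("whad up", "Greeting")]

theorem tableB_eq : tableB = tableL := by decide

theorem tableB_sorted : tableB.Pairwise (fun a b => a.1.toList < b.1.toList) := by
  rw [tableB_eq]; decide

-- no key ever repeats, so a matching entry determines the linear lookup
theorem lookupLin_of_mem (l : List (String × String)) (w c : String)
    (hs : l.Pairwise (fun a b => a.1.toList < b.1.toList)) (hm : (w, c) ∈ l) :
    lookupLin l w = some c := by
  induction l with
  | nil => cases hm
  | cons p r ih =>
    obtain ⟨k, v⟩ := p
    rcases List.mem_cons.mp hm with h | h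
    · obtain ⟨rfl, rfl⟩ := Prod.mk.injEq .. ▸ h
      simp [lookupLin]
    · have hk : k.toList < w.toList := by
        have := (List.pairwise_cons.mp hs).1 (w, c) h
        simpa using this
      have hne : ¬ (w == k) = true := by
        simp only [beq_iff_eq]
        rintro rfl; exact absurd rfl (ne_of_lt hk)
      simp only [lookupLin, if_neg hne]
      exact ih (List.pairwise_cons.mp hs).2 h

theorem lookupLin_of_not_mem (l : List (String × String)) (w : String)
    (hm : ∀ p ∈ l, p.1 ≠ w) : lookupLin l w = none := by
  induction l with
  | nil => rfl
  | cons p r ih =>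
    obtain ⟨k, v⟩ := p
    have hne : ¬ (w == k) = true := by
      simp only [beq_iff_eq]
      intro hEq; exact absurd hEq.symm (hm (k, v) (List.mem_cons_self ..))
    simp only [lookupLin, if_neg hne]
    exact ih fun p hp => hm p (List.mem_cons_of_mem _ hp)

-- keys strictly increase with the index
theorem tableB_key_lt {i j : Nat} (hi : i < tableB.length) (hj : j < tableB.length)
    (hij : i < j) : tableB[i].1.toList < tableB[j].1.toList :=
  (List.pairwise_iff_getElem.mp tableB_sorted) i j hi hj hij

-- the binary search agrees with the linear first-match lookup
theorem bisectB_correct (w : String) : ∀ (n lo hi : Nat), hi - lo = n → hi ≤ tableB.length →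
    (∀ i (h : i < tableB.length), i < lo → tableB[i].1.toList < w.toList) →
    (∀ i (h : i < tableB.length), hi ≤ i → w.toList < tableB[i].1.toList) →
    bisectB w lo hi = lookupLin tableB w := by
  intro n
  induction n using Nat.strong_induction_on with
  | _ n IH =>
    intro lo hi hn hhi hlow hhigh
    by_cases h : lo < hi
    · have hmidlt : (lo + hi) / 2 < tableB.length := by omega
      have hget : tableB[(lo + hi) / 2]? = some tableB[(lo + hi) / 2] := List.getElem?_eq_getElem hmidlt
      rcases hk : tableB[(lo + hi) / 2] with ⟨k, c⟩
      rw [bisectB.eq_def]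
      simp only [dif_pos h, hget, hk]
      have hkk : tableB[(lo + hi) / 2].1 = k := by rw [hk]
      by_cases h1 : k.toList < w.toList
      · rw [if_pos h1]
        refine IH (hi - ((lo + hi) / 2 + 1)) (by omega) _ _ rfl hhi ?_ hhigh
        intro i hilen hi2
        rcases Nat.lt_or_ge i lo with h' | h'
        · exact hlow i hilen h'
        · rcases Nat.lt_or_ge i ((lo + hi) / 2) with h'' | h''
          · exact lt_trans (hkk ▸ tableB_key_lt hilen hmidlt h'') h1
          · have hieq : i = (lo + hi) / 2 := by omega
            subst hieq; exact hkk ▸ h1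
      · rw [if_neg h1]
        by_cases h2 : w.toList < k.toList
        · rw [if_pos h2]
          refine IH ((lo + hi) / 2 - lo) (by omega) _ _ rfl (by omega) hlow ?_
          intro i hilen hi2
          rcases Nat.lt_or_ge ((lo + hi) / 2) i with h'' | h''
          · exact lt_trans h2 (hkk ▸ tableB_key_lt hmidlt hilen h'')
          · have hieq : i = (lo + hi) / 2 := by omega
            subst hieq; exact hkk ▸ h2
        · rw [if_neg h2]
          have hkw : k = w :=
            String.toList_inj.mp (le_antisymm (not_lt.mp h2) (not_lt.mp h1))
          subst hkw
          exact (lookupLin_of_mem tableB k c tableB_sorted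
            (hk ▸ List.getElem_mem hmidlt)).symm
    · rw [bisectB.eq_def]
      simp only [dif_neg h]
      refine (lookupLin_of_not_mem tableB w ?_).symm
      intro p hp
      obtain ⟨i, hilen, rfl⟩ := List.mem_iff_getElem.mp hp
      rcases Nat.lt_or_ge i lo with h' | h'
      · exact fun hEq => absurd (hEq ▸ hlow i hilen h') (lt_irrefl _)
      · exact fun hEq => absurd (hEq ▸ hhigh i hilen (by omega)) (lt_irrefl _)

theorem bisectB_eq_lookupLin (w : String) : bisectB w 0 tableB.length = lookupLin tableB w :=
  bisectB_correct w tableB.length 0 tableB.length rfl le_rfl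
    (fun i _ h => absurd h (Nat.not_lt_zero i)) (fun _ h h' => absurd h (Nat.not_lt.mpr h'))

-- the sorted-table lookup, expressed as A's cascade of scans
theorem lookupLin_cascade (w : String) : lookupLin tableB w =
    if scanEq condListA w then some "Cardio"
    else if scanEq strengthListA w then some "Strength"
    else if w == "calorie" then some "Calorie"
    else if scanEq greetingListA w then some "Greeting"
    else if scanEq monthListA w then some "Month"
    else none := by
  rw [tableB_eq]
  by_cases hmem : w ∈ tableL.map Prod.fst
  · simp only [tableL, List.map_cons, List.map_nil, List.mem_cons, List.not_mem_nil, or_false] at hmem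
    rcases hmem with rfl|rfl|rfl|rfl|rfl|rfl|rfl|rfl|rfl|rfl|rfl|rfl|rfl|rfl|rfl|rfl|rfl|rfl|rfl|rfl|rfl|rfl|rfl|rfl|rfl|rfl|rfl|rfl|rfl|rfl|rfl|rfl|rfl|rfl|rfl|rfl|rfl|rfl|rfl|rfl <;> decide
  · simp only [tableL, List.map_cons, List.map_nil, List.mem_cons, List.not_mem_nil, or_false,
      not_or] at hmem
    obtain ⟨h1,h2,h3,h4,h5,h6,h7,h8,h9,h10,h11,h12,h13,h14,h15,h16,h17,h18,h19,h20,
      h21,h22,h23,h24,h25,h26,h27,h28,h29,h30,h31,h32,h33,h34,h35,h36,h37,h38,h39,h40⟩ := hmem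
    simp [tableL, lookupLin, scanEq, condListA, strengthListA, greetingListA, monthListA,
      h1,h2,h3,h4,h5,h6,h7,h8,h9,h10,h11,h12,h13,h14,h15,h16,h17,h18,h19,h20,
      h21,h22,h23,h24,h25,h26,h27,h28,h29,h30,h31,h32,h33,h34,h35,h36,h37,h38,h39,h40]

theorem matchCategory_eq_alt (word : String) : matchCategory word = matchCategory_alt word := by
  unfold matchCategory matchCategory_alt
  by_cases hs : PySem.Str.pyGet? word (-1) == some 's' <;>
    simp only [hs, if_true, bisectB_eq_lookupLin, lookupLin_cascade, scanEq, dateListA] <;>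
    split_ifs <;> simp_all

-- ===== VERDICT (by name: the statement is the Claim_ definition above) =====
theorem matchCategory_spec : Claim_equal_matchCategory := by
  intro word _ _
  unfold Spec_matchCategory
  exact matchCategory_eq_alt word
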